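-- pv_equiv track=rewrite | github.com/woo427/Algorithm | 프로그래머스/0/181874. A 강조하기/A 강조하기.py | solution
-- ===== SOURCE A (Python) =====
-- def solution(myString):
--     answer = ''
--     for char in myString:
--         if char == "a":
--             answer += "A"
--         elif char == "A":
--             answer += "A"
--         else :
--             answer += char.lower()
--     return answer
-- ===== SOURCE B (Python) =====
-- def solution(myString):
--     return myString.lower().replace('a', 'A')
-- ===== Notes on version B (the rewrite author's own statement) =====
-- stated objective: idiomatic
-- what changed: Replaced the per-character conditional accumulation loop with two whole-string library passes: lowercase the whole string, then replace every lowercase-a with uppercase-A.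
import Mathlib
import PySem

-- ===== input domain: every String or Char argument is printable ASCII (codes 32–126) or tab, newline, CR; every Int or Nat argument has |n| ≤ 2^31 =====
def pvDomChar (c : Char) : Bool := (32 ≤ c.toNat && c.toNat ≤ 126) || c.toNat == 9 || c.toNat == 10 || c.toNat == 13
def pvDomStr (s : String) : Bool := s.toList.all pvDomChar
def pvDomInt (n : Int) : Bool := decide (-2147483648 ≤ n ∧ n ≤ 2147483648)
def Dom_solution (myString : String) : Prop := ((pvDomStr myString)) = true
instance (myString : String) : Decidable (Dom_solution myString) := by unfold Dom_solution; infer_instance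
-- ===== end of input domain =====

-- B replaces A's per-character conditional accumulation loop by two whole-string passes (lower, then replace); objective: idiomatic.

-- ===== PORT A =====
-- literal port of A: fold over the characters, appending to the accumulator string
def solution (myString : String) : String :=
  String.ofList (myString.toList.foldl
    (fun answer c =>
      if c = 'a' then answer ++ ['A']
      else if c = 'A' then answer ++ ['A']
      else answer ++ PySem.Chars.lower [c]) [])

-- ===== PORT B =====
def solution_alt (myString : String) : String :=
  PySem.Str.replace (PySem.Str.lower myString) "a" "A"

-- ===== PRECONDITION & SPEC =====
def Spec_solution (myString : String) (out : String) : Prop := out = solution_alt myString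
instance (myString : String) (out : String) : Decidable (Spec_solution myString out) := by unfold Spec_solution; infer_instance

-- ===== CLAIM (what is proved, stated in full; the proofs are below) =====
def Claim_equal_solution : Prop := ∀ (myString : String), Dom_solution myString → Spec_solution myString (solution myString)

-- ===== LEMMAS AND PROOFS =====

-- single-character replace over a list is a map
lemma replace_go_single (fuel : Nat) :
    ∀ (l acc : List Char), l.length ≤ fuel →
      PySem.Chars.replace.go ['a'] ['A'] fuel l acc
        = acc.reverse ++ l.map (fun c => if c = 'a' then 'A' else c) := by
  induction fuel with
  | zero =>
    intro l acc h
    have : l = [] := List.eq_nil_of_length_eq_zero (Nat.le_zero.mp h)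
    subst this
    simp [PySem.Chars.replace.go]
  | succ n ih =>
    intro l acc h
    cases l with
    | nil => simp [PySem.Chars.replace.go]
    | cons c t =>
      by_cases hc : c = 'a'
      · subst hc
        have hpre : (['a'] : List Char).isPrefixOf ('a' :: t) = true := by
          simp [List.isPrefixOf]
        simp only [PySem.Chars.replace.go, hpre, if_pos]
        rw [ih _ _ (by simpa using Nat.le_of_succ_le_succ h)]
        simp
      · have hpre : (['a'] : List Char).isPrefixOf (c :: t) = false := by
          simp [List.isPrefixOf]
          exact fun h => hc h.symm
        simp only [PySem.Chars.replace.go, hpre]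
        rw [ih t (c :: acc) (by simp at h; omega)]
        simp [hc]

lemma lowerChar_eq_a (c : Char) (h : PySem.Chars.lowerChar c = 'a') : c = 'a' ∨ c = 'A' := by
  unfold PySem.Chars.lowerChar at h
  by_cases hu : PySem.Chars.isupper c = true
  · right
    simp only [hu, if_pos] at h
    unfold PySem.Chars.isupper at hu
    simp only [Bool.and_eq_true, decide_eq_true_eq] at hu
    have h1 : (65 : Nat) ≤ c.toNat := hu.1
    have h2 : c.toNat ≤ 90 := hu.2
    have hv : (Char.ofNat (c.toNat + 32)).toNat = c.toNat + 32 := by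
      unfold Char.ofNat
      rw [dif_pos (Or.inl (by omega : c.toNat + 32 < 55296))]
      simp only [Char.ofNatAux, Char.toNat]
      rfl
    have h97 : c.toNat + 32 = 97 := by rw [← hv, h]; rfl
    have h65 : c.toNat = ('A' : Char).toNat := by
      show c.toNat = 65; omega
    exact Char.ext (UInt32.toNat_inj.mp h65)
  · left
    simpa [hu] using h

-- per-character: B's composed map agrees with A's conditional
lemma char_step (c : Char) :
    (if PySem.Chars.lowerChar c = 'a' then 'A' else PySem.Chars.lowerChar c)
      = (if c = 'a' then 'A' else if c = 'A' then 'A' else PySem.Chars.lowerChar c) := by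
  by_cases h1 : c = 'a'
  · subst h1; decide
  · by_cases h2 : c = 'A'
    · subst h2; decide
    · have : PySem.Chars.lowerChar c ≠ 'a' := fun h => by
        rcases lowerChar_eq_a c h with h | h <;> [exact h1 h; exact h2 h]
      simp [h1, h2, this]

-- A's fold builds the map of the per-character conditional
lemma solution_toList (s : String) :
    (solution s).toList
      = s.toList.map (fun c => if c = 'a' then 'A' else if c = 'A' then 'A'
          else PySem.Chars.lowerChar c) := by
  unfold solution
  rw [String.toList_ofList]
  have hfun : (fun (answer : List Char) c =>
      if c = 'a' then answer ++ ['A'] else if c = 'A' then answer ++ ['A']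
      else answer ++ PySem.Chars.lower [c])
      = fun (answer : List Char) c => answer ++
          [if c = 'a' then 'A' else if c = 'A' then 'A' else PySem.Chars.lowerChar c] := by
    funext answer c
    by_cases h1 : c = 'a'
    · simp [h1]
    · by_cases h2 : c = 'A' <;> simp [h1, h2, PySem.Chars.lower]
  rw [hfun, PySem.List.foldl_append_singleton_eq_map]
  simp

-- ===== VERDICT (by name: the statement is the Claim_ definition above) =====
theorem solution_spec : Claim_equal_solution := by
  intro s _
  unfold Spec_solution solution_alt
  apply String.toList_inj.mp
  rw [solution_toList]
  rw [PySem.Str.toList_replace]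
  simp only [PySem.Str.toList_lower]
  have ha : ("a" : String).toList = ['a'] := by decide
  have hA : ("A" : String).toList = ['A'] := by decide
  rw [ha, hA]
  unfold PySem.Chars.replace
  simp only [List.isEmpty]
  rw [replace_go_single _ _ _ (Nat.le_refl _)]
  simp only [List.reverse_nil, List.nil_append, PySem.Chars.lower, List.map_map]
  apply List.map_congr_left
  intro c _
  exact (char_step c).symm
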